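-- pv_equiv track=rewrite | github.com/khash2a/hnumber_theory | hnumber_theory.py | zPower
-- ===== SOURCE A (Python) =====
-- def zPower(a,b,c,k,n):
--     ''' (a + b*sqrt(c))^k mod n, retrun (a1,b1) '''
--     a1, b1 = 1, 0
--     a2, b2 = a, b
--     while k>0:
--         if k % 2 == 1:  # z1 *= z2
--             a1, b1 = (a1 * a2 + b1 * b2 * c) % n, (a1 * b2 + a2 * b1) % n
--         b2, a2 = (2 * a2 * b2) % n, (a2 * a2 + c * b2 * b2) % n  # z2 *= z2
--         k >>= 1  # k /= 2
--
--     return a1, b1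
-- ===== SOURCE B (Python) =====
-- def zPower(a, b, c, k, n):
--     ''' (a + b*sqrt(c))^k mod n, return (a1, b1) '''
--     def mul(x, y):
--         return ((x[0] * y[0] + x[1] * y[1] * c) % n,
--                 (x[0] * y[1] + x[1] * y[0]) % n)
--
--     def power(e):
--         if e <= 0:
--             return (1, 0)
--         s = power(e // 2)
--         s = mul(s, s)
--         if e % 2 == 1:
--             s = mul(s, (a, b))
--         return s
--
--     return power(k)
-- ===== Notes on version B (the rewrite author's own statement) =====
-- stated objective: alternative
-- what changed: Replaces the iterative LSB-first accumulator loop (square the base each step, multiply into the accumulator on odd bits) by a top-down recursive divide-and-conquer: recurse on k//2, square the half-power with the ring-squaring formula, and multiply by the base once when k is odd; Pre_ only excludes n == 0 with k > 0, where both programs raise ZeroDivisionError.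
import Mathlib
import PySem

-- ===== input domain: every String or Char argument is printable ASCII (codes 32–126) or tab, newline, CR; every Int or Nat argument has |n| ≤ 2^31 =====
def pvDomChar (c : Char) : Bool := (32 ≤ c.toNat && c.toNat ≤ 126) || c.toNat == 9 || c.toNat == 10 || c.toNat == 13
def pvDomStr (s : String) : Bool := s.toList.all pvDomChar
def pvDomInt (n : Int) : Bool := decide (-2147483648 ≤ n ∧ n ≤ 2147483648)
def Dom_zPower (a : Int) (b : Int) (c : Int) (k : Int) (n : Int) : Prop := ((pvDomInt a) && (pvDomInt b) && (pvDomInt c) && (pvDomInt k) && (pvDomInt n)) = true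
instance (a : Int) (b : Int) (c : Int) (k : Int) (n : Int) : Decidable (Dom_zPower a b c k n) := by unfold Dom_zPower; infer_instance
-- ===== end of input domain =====

-- B replaces A's bottom-up accumulator loop by top-down recursion on the exponent (divide and conquer);
-- same cost (O(log k) ring multiplications), a different decomposition. Equivalence of return values only.

-- ===== PORT A =====
-- A's while-loop: state (a1,b1,a2,b2,k); odd bit multiplies acc by base, base squares, k >>= 1.
def zPowerLoop (c n a1 b1 a2 b2 k : Int) : Int × Int :=
  if hk : 0 < k then
    let p : Int × Int :=
      if PySem.Int.mod k 2 = 1 then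
        (PySem.Int.mod (a1 * a2 + b1 * b2 * c) n, PySem.Int.mod (a1 * b2 + a2 * b1) n)
      else (a1, b1)
    zPowerLoop c n p.1 p.2
      (PySem.Int.mod (a2 * a2 + c * b2 * b2) n) (PySem.Int.mod (2 * a2 * b2) n)
      (k >>> (1 : Nat))
  else (a1, b1)
termination_by k.toNat
decreasing_by
  simp only [Int.shiftRight_eq_div_pow, pow_one]
  omega

def zPower (a : Int) (b : Int) (c : Int) (k : Int) (n : Int) : Int × Int :=
  zPowerLoop c n 1 0 a b k

-- ===== PORT B =====
-- Source B's mul: multiplication of (x0 + x1*sqrt(c)) by (y0 + y1*sqrt(c)) mod n.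
def zMulB (c n : Int) (x y : Int × Int) : Int × Int :=
  (PySem.Int.mod (x.1 * y.1 + x.2 * y.2 * c) n, PySem.Int.mod (x.1 * y.2 + x.2 * y.1) n)

-- Source B's power: recurse on e // 2, square, multiply by the base when e is odd.
def zPowB (a b c n e : Int) : Int × Int :=
  if he : e ≤ 0 then (1, 0)
  else
    let s := zPowB a b c n (PySem.Int.floordiv e 2)
    let s := zMulB c n s s
    if PySem.Int.mod e 2 = 1 then zMulB c n s (a, b) else s
termination_by e.toNat
decreasing_by
  rw [PySem.Int.floordiv_eq_ediv_of_pos (by omega)]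
  omega

def zPower_alt (a : Int) (b : Int) (c : Int) (k : Int) (n : Int) : Int × Int :=
  zPowB a b c n k

-- ===== PRECONDITION & SPEC =====
-- Pre_ excludes only n = 0 with k > 0: there both A and B raise ZeroDivisionError at the first '% n'.
def Pre_zPower (a : Int) (b : Int) (c : Int) (k : Int) (n : Int) : Prop := 0 < k → n ≠ 0
instance (a : Int) (b : Int) (c : Int) (k : Int) (n : Int) : Decidable (Pre_zPower a b c k n) := by unfold Pre_zPower; infer_instance
def pvWitness_zPower : Int × Int × Int × Int × Int := (2, 3, 5, 10, 7)

def Spec_zPower (a : Int) (b : Int) (c : Int) (k : Int) (n : Int) (out : Int × Int) : Prop := out = zPower_alt a b c k n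
instance (a : Int) (b : Int) (c : Int) (k : Int) (n : Int) (out : Int × Int) : Decidable (Spec_zPower a b c k n out) := by unfold Spec_zPower; infer_instance

-- ===== CLAIM (what is proved, stated in full; the proofs are below) =====
def Claim_equal_zPower : Prop := ∀ (a : Int) (b : Int) (c : Int) (k : Int) (n : Int), Dom_zPower a b c k n → Pre_zPower a b c k n → Spec_zPower a b c k n (zPower a b c k n)

-- ===== LEMMAS AND PROOFS =====

-- Exact (unreduced) arithmetic in Z[sqrt c]: multiplication and power.
def zM (c : Int) (x y : Int × Int) : Int × Int :=
  (x.1 * y.1 + x.2 * y.2 * c, x.1 * y.2 + x.2 * y.1)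

def zP (c : Int) (y : Int × Int) : Nat → Int × Int
  | 0 => (1, 0)
  | m + 1 => zM c y (zP c y m)

-- Componentwise congruence mod n, and componentwise Python-mod reduction.
def zCong (n : Int) (x y : Int × Int) : Prop := x.1 ≡ y.1 [ZMOD n] ∧ x.2 ≡ y.2 [ZMOD n]

def zRed (n : Int) (x : Int × Int) : Int × Int := (PySem.Int.mod x.1 n, PySem.Int.mod x.2 n)

theorem pmod_modEq (x n : Int) : PySem.Int.mod x n ≡ x [ZMOD n] := by
  have h := PySem.Int.floordiv_mul_add_mod x n
  exact Int.modEq_iff_dvd.mpr ⟨PySem.Int.floordiv x n, by linarith⟩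

theorem pmod_congr {x y n : Int} (hn : n ≠ 0) (h : x ≡ y [ZMOD n]) :
    PySem.Int.mod x n = PySem.Int.mod y n := by
  have hc : PySem.Int.mod x n ≡ PySem.Int.mod y n [ZMOD n] :=
    ((pmod_modEq x n).trans h).trans (pmod_modEq y n).symm
  have hd : n ∣ (PySem.Int.mod x n - PySem.Int.mod y n) := (Int.modEq_iff_dvd.mp hc.symm)
  have hz : PySem.Int.mod x n - PySem.Int.mod y n = 0 := by
    apply Int.eq_zero_of_abs_lt_dvd ((abs_dvd n _).mpr hd)
    rcases lt_or_gt_of_ne hn with h0 | h0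
    · have b1 := PySem.Int.mod_neg_bounds x h0
      have b2 := PySem.Int.mod_neg_bounds y h0
      rw [abs_lt, abs_of_neg h0]; omega
    · have b1 := PySem.Int.mod_nonneg x h0
      have b2 := PySem.Int.mod_lt x h0
      have b3 := PySem.Int.mod_nonneg y h0
      have b4 := PySem.Int.mod_lt y h0
      rw [abs_lt, abs_of_pos h0]; omega
  omega

theorem zRed_cong (n : Int) (x : Int × Int) : zCong n (zRed n x) x :=
  ⟨pmod_modEq x.1 n, pmod_modEq x.2 n⟩

theorem zRed_eq_of_cong {n : Int} (hn : n ≠ 0) {x y : Int × Int} (h : zCong n x y) :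
    zRed n x = zRed n y :=
  Prod.ext (pmod_congr hn h.1) (pmod_congr hn h.2)

theorem zCong_refl (n : Int) (x : Int × Int) : zCong n x x :=
  ⟨Int.ModEq.refl _, Int.ModEq.refl _⟩

theorem zCong_trans {n : Int} {x y z : Int × Int} (h1 : zCong n x y) (h2 : zCong n y z) :
    zCong n x z := ⟨h1.1.trans h2.1, h1.2.trans h2.2⟩

theorem zM_cong {n c : Int} {x x' y y' : Int × Int} (hx : zCong n x x') (hy : zCong n y y') :
    zCong n (zM c x y) (zM c x' y') :=
  ⟨(hx.1.mul hy.1).add ((hx.2.mul hy.2).mul (Int.ModEq.refl c)),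
   (hx.1.mul hy.2).add (hx.2.mul hy.1)⟩

theorem zP_cong {n c : Int} {x y : Int × Int} (h : zCong n x y) (m : Nat) :
    zCong n (zP c x m) (zP c y m) := by
  induction m with
  | zero => exact zCong_refl n _
  | succ m ih => exact zM_cong h ih

theorem zM_comm (c : Int) (x y : Int × Int) : zM c x y = zM c y x := by
  simp only [zM, Prod.mk.injEq]; constructor <;> ring

theorem zM_assoc (c : Int) (x y z : Int × Int) : zM c (zM c x y) z = zM c x (zM c y z) := by
  simp only [zM, Prod.mk.injEq]; constructor <;> ring

theorem zM_one (c : Int) (x : Int × Int) : zM c (1, 0) x = x := by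
  simp [zM]

theorem zP_add (c : Int) (y : Int × Int) (m1 m2 : Nat) :
    zP c y (m1 + m2) = zM c (zP c y m1) (zP c y m2) := by
  induction m1 with
  | zero => simp [zP, zM_one]
  | succ m1 ih =>
      have : m1 + 1 + m2 = (m1 + m2) + 1 := by omega
      rw [this, zP, zP, ih, ← zM_assoc]

theorem zP_two_mul (c : Int) (y : Int × Int) (m : Nat) :
    zP c y (2 * m) = zP c (zM c y y) m := by
  induction m with
  | zero => rfl
  | succ m ih =>
      have : 2 * (m + 1) = (2 * m) + 1 + 1 := by omega
      rw [this, zP, zP, ih, ← zM_assoc]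
      rfl

-- zMulB is literally reduce-after-exact-multiply.
theorem zMulB_eq (c n : Int) (x y : Int × Int) : zMulB c n x y = zRed n (zM c x y) := rfl

-- A's loop computes the reduction of acc * base^k (k > 0).
theorem zPowerLoop_eq (c n : Int) (hn : n ≠ 0) :
    ∀ (k : Int), 0 < k → ∀ (x y : Int × Int),
      zPowerLoop c n x.1 x.2 y.1 y.2 k = zRed n (zM c x (zP c y k.toNat)) := by
  suffices H : ∀ (N : Nat) (k : Int), k.toNat ≤ N → 0 < k → ∀ (x y : Int × Int),
      zPowerLoop c n x.1 x.2 y.1 y.2 k = zRed n (zM c x (zP c y k.toNat)) by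
    intro k hk x y; exact H k.toNat k le_rfl hk x y
  intro N
  induction N with
  | zero => intro k hN hk; omega
  | succ N ih =>
    intro k hN hk x y
    rw [zPowerLoop]
    simp only [dif_pos hk]
    have hsh : k >>> (1 : Nat) = k / 2 := by simp [Int.shiftRight_eq_div_pow]
    have hmod : PySem.Int.mod k 2 = k % 2 := PySem.Int.mod_eq_emod_of_pos (by omega)
    have hy'1 : PySem.Int.mod (y.1 * y.1 + c * y.2 * y.2) n = (zRed n (zM c y y)).1 := by
      simp only [zRed, zM]
      exact congrArg (fun t => PySem.Int.mod t n) (by ring)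
    have hy'2 : PySem.Int.mod (2 * y.1 * y.2) n = (zRed n (zM c y y)).2 := by
      simp only [zRed, zM]
      exact congrArg (fun t => PySem.Int.mod t n) (by ring)
    have hbase : ∀ m : Nat, zCong n (zP c (zRed n (zM c y y)) m) (zP c y (2 * m)) := by
      intro m; rw [zP_two_mul]; exact zP_cong (zRed_cong n (zM c y y)) m
    by_cases ho : k % 2 = 1
    · -- odd bit: accumulator is multiplied by the base
      simp only [hmod, ho, if_pos, hsh]
      have hxy1 : PySem.Int.mod (x.1 * y.1 + x.2 * y.2 * c) n = (zRed n (zM c x y)).1 := rfl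
      have hxy2 : PySem.Int.mod (x.1 * y.2 + y.1 * x.2) n = (zRed n (zM c x y)).2 := by
        simp only [zRed, zM]
        exact congrArg (fun t => PySem.Int.mod t n) (by ring)
      rw [hxy1, hxy2, hy'1, hy'2]
      by_cases h1 : k / 2 ≤ 0
      · -- k = 1: recursive call is on 0 and returns the accumulator
        have hk1 : k = 1 := by omega
        subst hk1
        rw [zPowerLoop]
        norm_num
        apply zRed_eq_of_cong hn
        have h1y : zP c y (1:Nat) = y := by
          show zM c y (1, 0) = y
          rw [zM_comm, zM_one]
        rw [show ((1:Nat) : ℕ) = 1 from rfl] at h1y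
        rw [h1y]; exact zCong_refl n _
      · have h1 : 0 < k / 2 := by omega
        have hrec := ih (k / 2) (by omega) h1 (zRed n (zM c x y)) (zRed n (zM c y y))
        rw [hrec]
        apply zRed_eq_of_cong hn
        have hsplit : k.toNat = 2 * (k / 2).toNat + 1 := by omega
        rw [hsplit]
        refine zCong_trans (zM_cong (zRed_cong n (zM c x y)) (hbase (k / 2).toNat)) ?_
        rw [show zP c y (2 * (k / 2).toNat + 1) = zM c y (zP c y (2 * (k / 2).toNat)) from rfl,
          ← zM_assoc]
        exact zCong_refl n _
    · -- even bit: accumulator unchanged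
      have hcond : ¬ (PySem.Int.mod k 2 = 1) := by omega
      simp only [hcond, if_false, hsh]
      rw [hy'1, hy'2]
      have h1 : 0 < k / 2 := by omega
      have hrec := ih (k / 2) (by omega) h1 (x.1, x.2) (zRed n (zM c y y))
      simp only [Prod.mk.eta] at hrec ⊢
      rw [hrec]
      apply zRed_eq_of_cong hn
      have hsplit : k.toNat = 2 * (k / 2).toNat := by omega
      rw [hsplit]
      exact zM_cong (zCong_refl n x) (hbase (k / 2).toNat)

-- B's recursion computes the reduction of base^e (e > 0).
theorem zPowB_eq (a b c n : Int) (hn : n ≠ 0) :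
    ∀ (e : Int), 0 < e → zPowB a b c n e = zRed n (zP c (a, b) e.toNat) := by
  suffices H : ∀ (N : Nat) (e : Int), e.toNat ≤ N → 0 < e →
      zPowB a b c n e = zRed n (zP c (a, b) e.toNat) by
    intro e he; exact H e.toNat e le_rfl he
  intro N
  induction N with
  | zero => intro e hN he; omega
  | succ N ih =>
    intro e hN he
    rw [zPowB]
    simp only [dif_neg (by omega : ¬ e ≤ 0)]
    have hfl : PySem.Int.floordiv e 2 = e / 2 := PySem.Int.floordiv_eq_ediv_of_pos (by norm_num)
    have hmod : PySem.Int.mod e 2 = e % 2 := PySem.Int.mod_eq_emod_of_pos (by norm_num)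
    rw [hfl, hmod]
    by_cases h1 : 0 < e / 2
    · have hrec := ih (e / 2) (by omega) h1
      rw [hrec]
      simp only [zMulB_eq]
      have hsq : zCong n (zM c (zRed n (zP c (a, b) (e / 2).toNat)) (zRed n (zP c (a, b) (e / 2).toNat)))
          (zP c (a, b) (2 * (e / 2).toNat)) := by
        rw [two_mul, zP_add]
        exact zM_cong (zRed_cong n _) (zRed_cong n _)
      by_cases ho : e % 2 = 1
      · simp only [if_pos ho]
        apply zRed_eq_of_cong hn
        have hsplit : e.toNat = 2 * (e / 2).toNat + 1 := by omega
        rw [hsplit]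
        have t1 := zCong_trans (zRed_cong n (zM c (zRed n (zP c (a, b) (e / 2).toNat))
          (zRed n (zP c (a, b) (e / 2).toNat)))) hsq
        refine zCong_trans (zM_cong t1 (zCong_refl n ((a:Int), (b:Int)))) ?_
        rw [show zP c ((a:Int), (b:Int)) (2 * (e / 2).toNat + 1)
            = zM c (a, b) (zP c (a, b) (2 * (e / 2).toNat)) from rfl, zM_comm c ((a:Int), (b:Int))]
        exact zCong_refl n _
      · simp only [if_neg ho]
        apply zRed_eq_of_cong hn
        have hsplit : e.toNat = 2 * (e / 2).toNat := by omega
        rw [hsplit]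
        exact hsq
    · -- e = 1
      have he1 : e = 1 := by omega
      subst he1
      norm_num
      rw [zPowB]
      norm_num
      simp only [zMulB_eq]
      apply zRed_eq_of_cong hn
      have t0 : zCong n (zM c ((1:Int), (0:Int)) ((1:Int), (0:Int))) (((1:Int), (0:Int)) : Int × Int) := by
        rw [zM_one]; exact zCong_refl n _
      have t1 := zCong_trans (zRed_cong n (zM c ((1:Int), (0:Int)) ((1:Int), (0:Int)))) t0
      refine zCong_trans (zM_cong t1 (zCong_refl n ((a:Int), (b:Int)))) ?_
      rw [zM_one]
      rw [show zP c ((a:Int), (b:Int)) (1:Nat) = zM c (a, b) ((1:Int), (0:Int)) from rfl,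
        zM_comm, zM_one]
      exact zCong_refl n _

-- ===== VERDICT (by name: the statement is the Claim_ definition above) =====
theorem zPower_spec : Claim_equal_zPower := by
  intro a b c k n _ hpre
  unfold Spec_zPower zPower zPower_alt
  by_cases hk : 0 < k
  · have hn := hpre hk
    have hA := zPowerLoop_eq c n hn k hk (1, 0) (a, b)
    simp only at hA
    rw [hA, zPowB_eq a b c n hn k hk, zM_one]
  · rw [zPowerLoop, zPowB]
    simp only [dif_neg hk, dif_pos (by omega : k ≤ 0)]
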